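-- pv_equiv track=rewrite | github.com/majoporse/uni | ib111/12/p1_lists.py | without_middle_occurrence
-- ===== SOURCE A (Python) =====
-- from typing import List
--
-- def without_middle_occurrence(values: List[int], value: int) -> List[int]:
--     indexes = []
--     for index, num in enumerate(values):
--         if num == value:
--             indexes.append(index)
--
--     if indexes != []:
--         middle = (len(indexes) - 1) // 2
--         mid_index = indexes[middle]
--         return [val for i, val in enumerate(values) if i != mid_index]
--     return [val for i, val in enumerate(values)]
-- ===== SOURCE B (Python) =====
-- def without_middle_occurrence(values, value):
--     count = values.count(value)
--     target = (count - 1) // 2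
--     result = []
--     occ = 0
--     for val in values:
--         if val == value:
--             if occ != target:
--                 result.append(val)
--             occ += 1
--         else:
--             result.append(val)
--     return result
-- ===== Notes on version B (the rewrite author's own statement) =====
-- stated objective: alternative
-- what changed: B drops A's index-list construction and index-based filtering entirely: it counts the occurrences once, then makes a single copying pass with a running occurrence counter that skips exactly the ((count-1)//2)-th occurrence.
import Mathlib
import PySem

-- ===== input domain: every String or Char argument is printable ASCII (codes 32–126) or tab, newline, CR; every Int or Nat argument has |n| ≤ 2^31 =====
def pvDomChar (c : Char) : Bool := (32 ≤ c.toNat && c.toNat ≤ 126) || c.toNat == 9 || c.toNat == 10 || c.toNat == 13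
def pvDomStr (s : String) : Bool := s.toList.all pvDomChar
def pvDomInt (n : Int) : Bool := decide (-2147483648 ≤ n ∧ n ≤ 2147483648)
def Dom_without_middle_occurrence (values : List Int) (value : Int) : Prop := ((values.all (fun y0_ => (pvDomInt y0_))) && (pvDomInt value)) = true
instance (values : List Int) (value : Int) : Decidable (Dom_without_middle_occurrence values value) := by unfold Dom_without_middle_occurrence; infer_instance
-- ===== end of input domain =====

-- B replaces A's index-list + index-filter decomposition by one counting pass and one
-- copying pass with a running occurrence counter (alternative decomposition, same cost).

-- ===== PORT A =====
def without_middle_occurrence (values : List Int) (value : Int) : List Int :=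
  let indexes := (PySem.List.enumerate values 0).foldl
      (fun acc (p : Int × Int) => if p.2 == value then acc ++ [p.1] else acc) []
  if indexes ≠ [] then
    let middle := PySem.Int.floordiv ((indexes.length : Int) - 1) 2
    -- indexes[middle]: provably in range here (0 ≤ middle < len indexes), so getD is never taken
    let mid_index := (PySem.List.pyGet? indexes middle).getD 0
    (PySem.List.enumerate values 0).foldl
      (fun acc (p : Int × Int) => if p.1 != mid_index then acc ++ [p.2] else acc) []
  else
    (PySem.List.enumerate values 0).foldl (fun acc (p : Int × Int) => acc ++ [p.2]) []

-- ===== PORT B =====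
def without_middle_occurrence_alt (values : List Int) (value : Int) : List Int :=
  let target := PySem.Int.floordiv ((values.count value : Int) - 1) 2
  (values.foldl
    (fun (st : List Int × Int) x =>
      if x = value then
        ((if st.2 ≠ target then st.1 ++ [x] else st.1), st.2 + 1)
      else (st.1 ++ [x], st.2)) ([], 0)).1

-- ===== PRECONDITION & SPEC =====
def Spec_without_middle_occurrence (values : List Int) (value : Int) (out : List Int) : Prop := out = without_middle_occurrence_alt values value
instance (values : List Int) (value : Int) (out : List Int) : Decidable (Spec_without_middle_occurrence values value out) := by unfold Spec_without_middle_occurrence; infer_instance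

-- ===== CLAIM (what is proved, stated in full; the proofs are below) =====
def Claim_equal_without_middle_occurrence : Prop := ∀ (values : List Int) (value : Int), Dom_without_middle_occurrence values value → Spec_without_middle_occurrence values value (without_middle_occurrence values value)

-- ===== LEMMAS AND PROOFS =====

-- reference: erase the m-th occurrence of v
def eraseOcc (v : Int) : List Int → Nat → List Int
  | [], _ => []
  | x :: xs, m => if x = v then (if m = 0 then xs else x :: eraseOcc v xs (m - 1)) else x :: eraseOcc v xs m

-- index (starting at s) of the m-th occurrence of v (junk s on fall-through)
def nthIdx (v : Int) : List Int → Int → Nat → Int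
  | [], s, _ => s
  | x :: xs, s, m => if x = v then (if m = 0 then s else nthIdx v xs (s + 1) (m - 1)) else nthIdx v xs (s + 1) m

-- B's loop body as structural recursion on the list
def recB (v target : Int) : List Int → Int → List Int
  | [], _ => []
  | x :: xs, occ =>
    if x = v then (if occ ≠ target then x :: recB v target xs (occ + 1) else recB v target xs (occ + 1))
    else x :: recB v target xs occ

theorem foldB_eq_recB (v target : Int) (l : List Int) (acc : List Int) (occ : Int) :
    (l.foldl (fun (st : List Int × Int) x =>
      if x = v then
        ((if st.2 ≠ target then st.1 ++ [x] else st.1), st.2 + 1)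
      else (st.1 ++ [x], st.2)) (acc, occ)).1 = acc ++ recB v target l occ := by
  induction l generalizing acc occ with
  | nil => simp [recB]
  | cons x xs ih =>
    simp only [List.foldl_cons, recB]
    by_cases hx : x = v
    · by_cases ho : occ = target
      · rw [if_pos hx, if_pos hx, if_neg (not_not_intro ho), if_neg (not_not_intro ho), ih]
      · rw [if_pos hx, if_pos hx, if_pos ho, if_pos ho, ih]
        simp
    · rw [if_neg hx, if_neg hx, ih]
      simp

theorem recB_of_gt (v target : Int) (l : List Int) (occ : Int) (h : target < occ) :
    recB v target l occ = l := by
  induction l generalizing occ with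
  | nil => rfl
  | cons x xs ih =>
    simp only [recB]
    by_cases hx : x = v
    · rw [if_pos hx, if_pos (show occ ≠ target by omega), ih (occ + 1) (by omega)]
    · rw [if_neg hx, ih occ h]

theorem recB_eq_eraseOcc (v target : Int) (l : List Int) (occ : Int) (h0 : occ ≤ target)
    (hlt : (target - occ).toNat < l.count v) :
    recB v target l occ = eraseOcc v l (target - occ).toNat := by
  induction l generalizing occ with
  | nil => simp at hlt
  | cons x xs ih =>
    simp only [recB, eraseOcc]
    by_cases hx : x = v
    · by_cases ho : occ = target
      · rw [if_pos hx, if_pos hx, if_neg (not_not_intro ho),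
          if_pos (show (target - occ).toNat = 0 by omega)]
        exact recB_of_gt v target xs (occ + 1) (by omega)
      · simp [List.count_cons, hx] at hlt
        rw [if_pos hx, if_pos hx, if_pos ho,
          if_neg (show ¬(target - occ).toNat = 0 by omega),
          ih (occ + 1) (by omega) (by omega)]
        congr 2
        omega
    · simp [List.count_cons, hx] at hlt
      rw [if_neg hx, if_neg hx, ih occ h0 hlt]

theorem nthIdx_ge (v : Int) (l : List Int) (s : Int) (m : Nat) : s ≤ nthIdx v l s m := by
  induction l generalizing s m with
  | nil => simp [nthIdx]
  | cons x xs ih =>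
    simp only [nthIdx]
    split_ifs with hx hm
    · exact le_refl s
    · exact le_trans (by omega) (ih (s + 1) (m - 1))
    · exact le_trans (by omega) (ih (s + 1) m)

-- filtering by index keeps everything whose index is above mid
theorem filter_enum_all (l : List Int) (s mid : Int) (h : mid < s) :
    ((PySem.List.enumerate l s).filter (fun p => p.1 != mid)).map (·.2) = l := by
  induction l generalizing s with
  | nil => simp [PySem.List.enumerate_nil]
  | cons x xs ih =>
    rw [PySem.List.enumerate_cons]
    simp only [List.filter_cons]
    have : (s != mid) = true := by simp; omega
    simp only [this, if_pos]
    simp [List.map_cons, ih (s + 1) (by omega)]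

theorem filter_enum_eq_eraseOcc (v : Int) (l : List Int) (s : Int) (m : Nat)
    (hm : m < l.count v) :
    ((PySem.List.enumerate l s).filter (fun p => p.1 != nthIdx v l s m)).map (·.2)
      = eraseOcc v l m := by
  induction l generalizing s m with
  | nil => simp at hm
  | cons x xs ih =>
    rw [PySem.List.enumerate_cons]
    by_cases hx : x = v
    · simp [List.count_cons, hx] at hm
      by_cases hm0 : m = 0
      · have hmid : nthIdx v (x :: xs) s m = s := by simp [nthIdx, hx, hm0]
        rw [hmid, List.filter_cons, if_neg (by simp)]
        have he : eraseOcc v (x :: xs) m = xs := by simp [eraseOcc, hx, hm0]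
        rw [he]
        exact filter_enum_all xs (s + 1) s (by omega)
      · have hmid : nthIdx v (x :: xs) s m = nthIdx v xs (s + 1) (m - 1) := by
          simp [nthIdx, hx, hm0]
        have hge := nthIdx_ge v xs (s + 1) (m - 1)
        rw [hmid, List.filter_cons, if_pos (by simp; omega), List.map_cons]
        have he : eraseOcc v (x :: xs) m = x :: eraseOcc v xs (m - 1) := by
          simp [eraseOcc, hx, hm0]
        rw [he, ih (s + 1) (m - 1) (by omega)]
    · simp [List.count_cons, hx] at hm
      have hge := nthIdx_ge v xs (s + 1) m
      have hmid : nthIdx v (x :: xs) s m = nthIdx v xs (s + 1) m := by simp [nthIdx, hx]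
      rw [hmid, List.filter_cons, if_pos (by simp; omega), List.map_cons]
      have he : eraseOcc v (x :: xs) m = x :: eraseOcc v xs m := by simp [eraseOcc, hx]
      rw [he, ih (s + 1) m hm]

-- the index list A builds: filter/map form, its length and its elements
theorem idxs_length (v : Int) (l : List Int) (s : Int) :
    (((PySem.List.enumerate l s).filter (fun p => p.2 == v)).map (·.1)).length = l.count v := by
  induction l generalizing s with
  | nil => simp [PySem.List.enumerate_nil]
  | cons x xs ih =>
    rw [PySem.List.enumerate_cons]
    by_cases hx : x = v
    · simp [List.filter_cons, hx, List.count_cons, ih (s + 1)]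
    · simp [List.filter_cons, hx, List.count_cons, ih (s + 1), Ne.symm hx]

theorem idxs_getElem (v : Int) (l : List Int) (s : Int) (m : Nat) (hm : m < l.count v) :
    (((PySem.List.enumerate l s).filter (fun p => p.2 == v)).map (·.1))[m]? = some (nthIdx v l s m) := by
  induction l generalizing s m with
  | nil => simp at hm
  | cons x xs ih =>
    rw [PySem.List.enumerate_cons]
    by_cases hx : x = v
    · simp [List.count_cons, hx] at hm
      have hmid : nthIdx v (x :: xs) s m = if m = 0 then s else nthIdx v xs (s + 1) (m - 1) := by
        simp [nthIdx, hx]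
      rw [hmid, List.filter_cons, if_pos (by simp [hx]), List.map_cons]
      by_cases hm0 : m = 0
      · simp [hm0]
      · rw [List.getElem?_cons, if_neg (by omega), if_neg hm0]
        exact ih (s + 1) (m - 1) (by omega)
    · simp [List.count_cons, hx] at hm
      have hmid : nthIdx v (x :: xs) s m = nthIdx v xs (s + 1) m := by simp [nthIdx, hx]
      rw [hmid, List.filter_cons, if_neg (by simp [hx])]
      exact ih (s + 1) m hm

-- ===== VERDICT (by name: the statement is the Claim_ definition above) =====
theorem without_middle_occurrence_spec : Claim_equal_without_middle_occurrence := by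
  intro values value _
  show without_middle_occurrence values value = without_middle_occurrence_alt values value
  unfold without_middle_occurrence without_middle_occurrence_alt
  simp only [PySem.List.foldl_append_if, foldB_eq_recB, List.nil_append]
  by_cases hk : values.count value = 0
  · have hI : ((PySem.List.enumerate values 0).filter (fun p => p.2 == value)).map (·.1) = [] :=
      List.eq_nil_of_length_eq_zero ((idxs_length value values 0).trans hk)
    rw [if_neg (by simp [hI])]
    rw [PySem.List.foldl_append_singleton_eq_map, List.nil_append, PySem.List.map_snd_enumerate]
    rw [hk]
    rw [show PySem.Int.floordiv (((0 : Nat) : Int) - 1) 2 = -1 from by decide]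
    exact (recB_of_gt value (-1) values 0 (by omega)).symm
  · have hk1 : 1 ≤ values.count value := by omega
    set k := values.count value with hkdef
    set m := (k - 1) / 2 with hmdef
    have hm : m < k := lt_of_le_of_lt (Nat.div_le_self _ _) (by omega)
    have htarget : PySem.Int.floordiv ((k : Int) - 1) 2 = (m : Int) := by
      rw [show ((k : Int) - 1) = ((k - 1 : Nat) : Int) from by omega]
      exact_mod_cast PySem.Int.floordiv_natCast (k - 1) 2
    have hlen : (((PySem.List.enumerate values 0).filter (fun p => p.2 == value)).map (·.1)).length = k :=
      idxs_length value values 0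
    rw [if_pos (by intro h; rw [h] at hlen; simp at hlen; omega)]
    rw [hlen, htarget]
    rw [PySem.List.pyGet?_natCast, (idxs_getElem value values 0 m hm), Option.getD_some]
    rw [filter_enum_eq_eraseOcc value values 0 m hm]
    rw [recB_eq_eraseOcc value (m : Int) values 0 (by omega) (by simpa using hm)]
    simp
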